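-- pv_equiv track=rewrite | github.com/2005czq/md2nc | md2nc.py | is_html_only_line
-- ===== SOURCE A (Python) =====
-- from typing import Dict, List, Optional, Tuple
--
-- def find_html_tag_end(text: str, start: int) -> Optional[int]:
--     if start >= len(text) or text[start] != "<":
--         return None
--
--     if text.startswith("<!--", start):
--         end = text.find("-->", start + 4)
--         return end + 3 if end != -1 else None
--
--     i = start + 1
--     if i >= len(text):
--         return None
--
--     if text[i] == "/":
--         i += 1
--         if i >= len(text) or not text[i].isalpha():
--             return None
--     elif text[i] in "!?":
--         i += 1
--     elif not text[i].isalpha():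
--         return None
--
--     if text[start + 1] not in "!?":
--         while i < len(text) and (text[i].isalnum() or text[i] in "-_:"):
--             i += 1
--
--     quote_char: Optional[str] = None
--     while i < len(text):
--         ch = text[i]
--         if quote_char is not None:
--             if ch == quote_char:
--                 quote_char = None
--         else:
--             if ch in "\"'":
--                 quote_char = ch
--             elif ch == ">":
--                 return i + 1
--             elif ch == "<":
--                 return None
--         i += 1
--
--     return None
--
-- def is_html_only_line(text: str) -> bool:
--     i = 0
--     saw_tag = False
--
--     while i < len(text):
--         if text[i].isspace():
--             i += 1
--             continue
--
--         end = find_html_tag_end(text, i)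
--         if end is None:
--             return False
--
--         saw_tag = True
--         i = end
--
--     return saw_tag
-- ===== SOURCE B (Python) =====
-- def is_html_only_line(text: str) -> bool:
--     # Flat single-pass state machine: 0=outside, 1=tag name, 2=attributes, 3=comment.
--     OUTSIDE, NAME, ATTRS, COMMENT = 0, 1, 2, 3
--     state = OUTSIDE
--     quote = None
--     saw_tag = False
--     i, n = 0, len(text)
--     while i < n:
--         ch = text[i]
--         if state == OUTSIDE:
--             if ch.isspace():
--                 i += 1
--             elif ch != "<":
--                 return False
--             elif text[i:i + 4] == "<!--":
--                 state = COMMENT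
--                 i += 4
--             elif i + 1 >= n:
--                 return False
--             else:
--                 nxt = text[i + 1]
--                 if nxt in "!?":
--                     state = ATTRS
--                     i += 2
--                 elif nxt == "/":
--                     if i + 2 >= n or not text[i + 2].isalpha():
--                         return False
--                     state = NAME
--                     i += 3
--                 elif nxt.isalpha():
--                     state = NAME
--                     i += 2
--                 else:
--                     return False
--         elif state == COMMENT:
--             if text[i:i + 3] == "-->":
--                 saw_tag = True
--                 state = OUTSIDE
--                 i += 3
--             else:
--                 i += 1
--         elif state == NAME and (ch.isalnum() or ch in "-_:"):
--             i += 1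
--         else:
--             # NAME falls through here on its first non-name character,
--             # which is consumed under the attribute rules below.
--             state = ATTRS
--             if quote is not None:
--                 if ch == quote:
--                     quote = None
--                 i += 1
--             elif ch in "\"'":
--                 quote = ch
--                 i += 1
--             elif ch == ">":
--                 saw_tag = True
--                 state = OUTSIDE
--                 i += 1
--             elif ch == "<":
--                 return False
--             else:
--                 i += 1
--     return saw_tag and state == OUTSIDE
-- ===== Notes on version B (the rewrite author's own statement) =====
-- stated objective: alternative
-- what changed: Replaced the helper-based scan (find_html_tag_end computing an end index per tag, re-called from the outer loop) by one flat single-pass state machine (outside / name / attrs / comment states with a quote register) that never computes tag end positions.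
import Mathlib
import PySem

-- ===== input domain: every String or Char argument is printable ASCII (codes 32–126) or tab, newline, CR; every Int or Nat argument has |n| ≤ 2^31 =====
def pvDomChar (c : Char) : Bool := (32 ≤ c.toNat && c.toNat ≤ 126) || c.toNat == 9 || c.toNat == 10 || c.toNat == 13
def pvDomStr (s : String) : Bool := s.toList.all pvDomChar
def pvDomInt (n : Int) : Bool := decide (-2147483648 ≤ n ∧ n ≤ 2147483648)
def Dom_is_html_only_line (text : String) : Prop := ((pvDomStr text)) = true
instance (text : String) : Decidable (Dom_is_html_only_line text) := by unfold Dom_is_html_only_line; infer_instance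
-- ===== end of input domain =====

-- B replaces A's per-tag helper (which computes an end index the outer loop jumps to) by one
-- flat single-pass state machine; same O(n) cost, different decomposition ("alternative").

-- shared char classes (Python's per-char isspace/isalpha/isalnum via PySem)
def nameChar (c : Char) : Bool := PySem.Chars.isalnum c || (c = '-' || c = '_' || c = ':')

-- s[j:j+p.length] == p (Python startswith at index j; also the slice compares in Source B)
def startsWithAt (l : List Char) (p : List Char) (j : Nat) : Bool := (l.drop j).take p.length == p

-- tiny root-level facts the loops' termination proofs cite (keeps the stored proof terms small)
theorem pvDecStep (n i k : Nat) (h : i < n) (hk : 0 < k) : n - (i + k) < n - i := by omega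
theorem pvDecFind (n j : Nat) (h : j + 3 ≤ n) : n - (j + 1) < n - j := by omega
theorem pvDecTag (n i e : Nat) (hie : i < e) (hin : i < n) : n - e < n - i := by omega

-- ===== PORT A =====
-- text.find("-->", j): first j' ≥ j with a "-->" at j', else none (Python returns -1)
def aFind (l : List Char) (j : Nat) : Option Nat :=
  if hf : j + 3 ≤ l.length then
    if startsWithAt l ['-', '-', '>'] j then some j else aFind l (j + 1)
  else none
termination_by l.length - j
decreasing_by exact pvDecFind _ _ hf

-- the name-consuming while loop: first index ≥ j whose char is not a name char
def aName (l : List Char) (j : Nat) : Nat :=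
  if h : j < l.length then
    if nameChar l[j] then aName l (j + 1) else j
  else j
termination_by l.length - j
decreasing_by exact pvDecStep _ _ _ h (by decide)

-- the attribute/quote while loop of find_html_tag_end
def aAttr (l : List Char) (j : Nat) (q : Option Char) : Option Nat :=
  if h : j < l.length then
    match q with
    | some qc => if l[j] = qc then aAttr l (j + 1) none else aAttr l (j + 1) (some qc)
    | none =>
      if l[j] = '"' ∨ l[j] = '\'' then aAttr l (j + 1) (some l[j])
      else if l[j] = '>' then some (j + 1)
      else if l[j] = '<' then none
      else aAttr l (j + 1) none
  else none
termination_by l.length - j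
decreasing_by all_goals exact pvDecStep _ _ _ h (by decide)

def findHtmlTagEnd (l : List Char) (start : Nat) : Option Nat :=
  if h0 : start < l.length then
    if l[start] = '<' then
      if startsWithAt l ['<', '!', '-', '-'] start then
        match aFind l (start + 4) with
        | some e => some (e + 3)
        | none => none
      else if h1 : start + 1 < l.length then
        let c1 := l[start + 1]
        if c1 = '/' then
          if h2 : start + 2 < l.length then
            if PySem.Chars.isalpha l[start + 2] then
              aAttr l (aName l (start + 2)) none
            else none
          else none
        else if c1 = '!' ∨ c1 = '?' then
          aAttr l (start + 2) none
        else if PySem.Chars.isalpha c1 then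
          aAttr l (aName l (start + 1)) none
        else none
      else none
    else none
  else none

-- lower bounds on the loop results (needed by aLoop's termination)
theorem aFind_le (l : List Char) (j : Nat) : ∀ e, aFind l j = some e → j ≤ e := by
  fun_induction aFind l j <;> intro e h <;> simp_all <;> omega

theorem le_aName (l : List Char) (j : Nat) : j ≤ aName l j := by
  fun_induction aName l j with
  | case1 j' _ _ ih => omega
  | case2 => omega
  | case3 => omega

theorem aAttr_lt (l : List Char) (j : Nat) (q : Option Char) :
    ∀ e, aAttr l j q = some e → j < e := by
  fun_induction aAttr l j q <;> intro e h <;> simp_all <;> omega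

theorem findHtmlTagEnd_lt {l : List Char} {i e : Nat}
    (h : findHtmlTagEnd l i = some e) : i < e := by
  unfold findHtmlTagEnd at h
  repeat' split at h
  all_goals try simp_all
  case h_1 => rename_i heq; have := aFind_le _ _ _ heq; omega
  all_goals
    repeat first | (obtain ⟨-, h⟩ := h) | split at h | simp_all
  all_goals
    repeat first | (obtain ⟨-, h⟩ := h) | split at h
  all_goals try split_ifs at h
  all_goals try simp_all
  all_goals
    (have h1 := aAttr_lt _ _ _ _ h
     first
       | omega
       | (have h2 := le_aName l (i + 2); omega)
       | (have h2 := le_aName l (i + 1); omega))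

def aLoop (l : List Char) (i : Nat) (saw : Bool) : Bool :=
  if h : i < l.length then
    if PySem.Chars.isspace l[i] then aLoop l (i + 1) saw
    else
      match he : findHtmlTagEnd l i with
      | none => false
      | some e => aLoop l e true
  else saw
termination_by l.length - i
decreasing_by
  · exact pvDecStep _ _ _ h (by decide)
  · exact pvDecTag _ _ _ (findHtmlTagEnd_lt he) h

def is_html_only_line (text : String) : Bool := aLoop text.toList 0 false

-- ===== PORT B =====
-- states: 0 = OUTSIDE, 1 = NAME, 2 = ATTRS, 3 = COMMENT (as in Source B)
-- states: 0 = OUTSIDE, 1 = NAME, 2 = ATTRS, 3 = COMMENT (as in Source B; NAME falls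
-- through to the attribute rules on its first non-name character, so every
-- iteration consumes at least one character)
def bLoop (l : List Char) (i : Nat) (state : Nat) (quote : Option Char) (saw : Bool) : Bool :=
  if h : i < l.length then
    if state = 0 then
      if PySem.Chars.isspace l[i] then bLoop l (i + 1) 0 quote saw
      else if l[i] ≠ '<' then false
      else if startsWithAt l ['<', '!', '-', '-'] i then bLoop l (i + 4) 3 quote saw
      else if h1 : i + 1 < l.length then
        if l[i + 1] = '!' ∨ l[i + 1] = '?' then bLoop l (i + 2) 2 quote saw
        else if l[i + 1] = '/' then
          if h2 : i + 2 < l.length then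
            if PySem.Chars.isalpha l[i + 2] then bLoop l (i + 3) 1 quote saw else false
          else false
        else if PySem.Chars.isalpha l[i + 1] then bLoop l (i + 2) 1 quote saw
        else false
      else false
    else if state = 3 then
      if startsWithAt l ['-', '-', '>'] i then bLoop l (i + 3) 0 quote true
      else bLoop l (i + 1) 3 quote saw
    else if state = 1 ∧ nameChar l[i] = true then bLoop l (i + 1) 1 quote saw
    else
      match quote with
      | some qc => if l[i] = qc then bLoop l (i + 1) 2 none saw else bLoop l (i + 1) 2 (some qc) saw
      | none =>
        if l[i] = '"' ∨ l[i] = '\'' then bLoop l (i + 1) 2 (some l[i]) saw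
        else if l[i] = '>' then bLoop l (i + 1) 0 none true
        else if l[i] = '<' then false
        else bLoop l (i + 1) 2 none saw
  else saw && decide (state = 0)
termination_by l.length - i
decreasing_by all_goals exact pvDecStep _ _ _ h (by decide)

def is_html_only_line_alt (text : String) : Bool := bLoop text.toList 0 0 none false

-- ===== PRECONDITION & SPEC =====
def Spec_is_html_only_line (text : String) (out : Bool) : Prop := out = is_html_only_line_alt text
instance (text : String) (out : Bool) : Decidable (Spec_is_html_only_line text out) := by unfold Spec_is_html_only_line; infer_instance

-- ===== CLAIM (what is proved, stated in full; the proofs are below) =====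
def Claim_equal_is_html_only_line : Prop := ∀ (text : String), Dom_is_html_only_line text → Spec_is_html_only_line text (is_html_only_line text)

-- ===== LEMMAS AND PROOFS =====

-- past the last possible "-->" start, B's comment scan runs to the end and fails
theorem bLoop_comment_tail (l : List Char) (j : Nat) (q : Option Char) (saw : Bool)
    (hgt : l.length < j + 3) : bLoop l j 3 q saw = false := by
  induction hk : l.length - j using Nat.strong_induction_on generalizing j saw with
  | _ k IH =>
  subst hk
  by_cases hj : j < l.length
  · rw [bLoop]
    have hsw : startsWithAt l ['-', '-', '>'] j = false := by
      unfold startsWithAt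
      rw [beq_eq_false_iff_ne]
      intro hEq
      have := congrArg List.length hEq
      simp at this
      omega
    simp only [hj, dif_pos, hsw]
    have := IH (l.length - (j + 1)) (by omega) (j + 1) saw (by omega) rfl
    simp [this]
  · rw [bLoop]
    simp [hj]

-- B's COMMENT state realises A's text.find("-->", j) jump
theorem bLoop_comment (l : List Char) (j : Nat) (q : Option Char) (saw : Bool) :
    bLoop l j 3 q saw =
      match aFind l j with
      | some e => bLoop l (e + 3) 0 q true
      | none => false := by
  fun_induction aFind l j with
  | case1 j hle hsw =>
      rw [bLoop]
      have hj : j < l.length := by omega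
      simp [hj, hsw]
  | case2 j hle hsw ih =>
      rw [bLoop]
      have hj : j < l.length := by omega
      simp [hj, hsw, ih]
  | case3 j hgt =>
      exact bLoop_comment_tail l j q saw (by omega)

-- B's NAME state realises A's name loop
theorem bLoop_name (l : List Char) (j : Nat) (q : Option Char) (saw : Bool) :
    bLoop l j 1 q saw = bLoop l (aName l j) 2 q saw := by
  fun_induction aName l j with
  | case1 j hj hc ih =>
      rw [bLoop]
      simp [hj, hc, ih]
  | case2 j hj hc =>
      conv_lhs => rw [bLoop]
      conv_rhs => rw [bLoop]
      simp [hj, hc]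
  | case3 j hj =>
      have ha : aName l j = j := by rw [aName]; simp [hj]
      conv_lhs => rw [bLoop]
      conv_rhs => rw [bLoop]
      simp [hj]

-- B's ATTRS state realises A's attribute/quote loop
theorem bLoop_attr (l : List Char) (j : Nat) (q : Option Char) (saw : Bool) :
    bLoop l j 2 q saw =
      match aAttr l j q with
      | some e => bLoop l e 0 none true
      | none => false := by
  fun_induction aAttr l j q <;> (conv_lhs => rw [bLoop]) <;> simp_all

theorem aLoop_eq_bLoop (l : List Char) (i : Nat) (saw : Bool) :
    aLoop l i saw = bLoop l i 0 none saw := by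
  induction hk : l.length - i using Nat.strong_induction_on generalizing i saw with
  | _ k IH =>
  subst hk
  by_cases hi : i < l.length
  · conv_lhs => rw [aLoop]
    conv_rhs => rw [bLoop]
    by_cases hsp : PySem.Chars.isspace l[i] = true
    · simp only [hi, dif_pos, hsp, if_pos, ite_true]
      exact IH _ (by omega) _ _ rfl
    · by_cases hlt : l[i] = '<'
      · have hs2 : PySem.Chars.isspace '<' = false := by decide
        by_cases hcm : startsWithAt l ['<', '!', '-', '-'] i = true
        · rcases hf : aFind l (i + 4) with _ | e
          · have hfe : findHtmlTagEnd l i = none := by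
              unfold findHtmlTagEnd; simp [hi, hlt, hcm, hf]
            simp [hi, hsp, hs2, hlt, hcm, bLoop_comment, hf]
            all_goals (split <;> simp_all)
          · have hfe : findHtmlTagEnd l i = some (e + 3) := by
              unfold findHtmlTagEnd; simp [hi, hlt, hcm, hf]
            have he := aFind_le _ _ _ hf
            have IH' := IH (l.length - (e + 3)) (by omega) (e + 3) true rfl
            simp [hi, hsp, hs2, hlt, hcm, bLoop_comment, hf, IH']
            all_goals (split <;> simp_all)
        · by_cases h1 : i + 1 < l.length
          · by_cases hb : l[i + 1] = '!' ∨ l[i + 1] = '?'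
            · have hns : l[i + 1] ≠ '/' := by rcases hb with hb | hb <;> simp [hb]
              have hfe : findHtmlTagEnd l i = aAttr l (i + 2) none := by
                unfold findHtmlTagEnd; simp [hi, hlt, hcm, h1, hns, hb]
              rcases ha : aAttr l (i + 2) none with _ | e
              · simp [hi, hsp, hs2, hlt, hcm, h1, hb, bLoop_attr, ha]
                all_goals (split <;> simp_all)
              · have he := aAttr_lt _ _ _ _ ha
                have IH' := IH (l.length - e) (by omega) e true rfl
                simp [hi, hsp, hs2, hlt, hcm, h1, hb, bLoop_attr, ha, IH']
                all_goals (split <;> simp_all)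
            · by_cases hsl : l[i + 1] = '/'
              · by_cases h2 : i + 2 < l.length
                · by_cases hal : PySem.Chars.isalpha l[i + 2] = true
                  · have hnc : nameChar l[i + 2] = true := by
                      simp [nameChar, PySem.Chars.isalnum, hal]
                    have hstep : aName l (i + 2) = aName l (i + 3) := by
                      conv_lhs => rw [aName]
                      simp [h2, hnc]
                    have hfe : findHtmlTagEnd l i = aAttr l (aName l (i + 2)) none := by
                      unfold findHtmlTagEnd; simp [hi, hlt, hcm, h1, hsl, h2, hal]
                    rcases ha : aAttr l (aName l (i + 2)) none with _ | e
                    · simp [hi, hsp, hs2, hlt, hcm, h1, hb, hsl, h2, hal,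
                        bLoop_name, ← hstep, bLoop_attr, ha]
                      all_goals (split <;> simp_all)
                    · have he := aAttr_lt _ _ _ _ ha
                      have hge := le_aName l (i + 2)
                      have IH' := IH (l.length - e) (by omega) e true rfl
                      simp [hi, hsp, hs2, hlt, hcm, h1, hb, hsl, h2, hal,
                        bLoop_name, ← hstep, bLoop_attr, ha, IH']
                      all_goals (split <;> simp_all)
                  · have hfe : findHtmlTagEnd l i = none := by
                      unfold findHtmlTagEnd; simp [hi, hlt, hcm, h1, hsl, h2, hal]
                    simp [hi, hsp, hs2, hlt, hcm, h1, hb, hsl, h2, hal]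
                    all_goals (split <;> simp_all)
                · have hfe : findHtmlTagEnd l i = none := by
                    unfold findHtmlTagEnd; simp [hi, hlt, hcm, h1, hsl, h2]
                  simp [hi, hsp, hs2, hlt, hcm, h1, hb, hsl, h2]
                  all_goals (split <;> simp_all)
              · by_cases hal : PySem.Chars.isalpha l[i + 1] = true
                · have hnc : nameChar l[i + 1] = true := by
                    simp [nameChar, PySem.Chars.isalnum, hal]
                  have hstep : aName l (i + 1) = aName l (i + 2) := by
                    conv_lhs => rw [aName]
                    simp [h1, hnc]
                  have hfe : findHtmlTagEnd l i = aAttr l (aName l (i + 1)) none := by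
                    unfold findHtmlTagEnd; simp [hi, hlt, hcm, h1, hsl, hb, hal]
                  rcases ha : aAttr l (aName l (i + 1)) none with _ | e
                  · simp [hi, hsp, hs2, hlt, hcm, h1, hb, hsl, hal,
                      bLoop_name, ← hstep, bLoop_attr, ha]
                    all_goals (split <;> simp_all)
                  · have he := aAttr_lt _ _ _ _ ha
                    have hge := le_aName l (i + 1)
                    have IH' := IH (l.length - e) (by omega) e true rfl
                    simp [hi, hsp, hs2, hlt, hcm, h1, hb, hsl, hal,
                      bLoop_name, ← hstep, bLoop_attr, ha, IH']
                    all_goals (split <;> simp_all)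
                · have hfe : findHtmlTagEnd l i = none := by
                    unfold findHtmlTagEnd; simp [hi, hlt, hcm, h1, hsl, hb, hal]
                  simp [hi, hsp, hs2, hlt, hcm, h1, hb, hsl, hal]
                  all_goals (split <;> simp_all)
          · have hfe : findHtmlTagEnd l i = none := by
              unfold findHtmlTagEnd; simp [hi, hlt, hcm, h1]
            simp [hi, hsp, hs2, hlt, hcm, h1]
            all_goals (split <;> simp_all)
      · have hfe : findHtmlTagEnd l i = none := by
          unfold findHtmlTagEnd; simp [hi, hlt]
        simp [hi, hsp, hlt]
        all_goals (split <;> simp_all)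
  · rw [aLoop, bLoop]
    simp [hi]

-- ===== VERDICT (by name: the statement is the Claim_ definition above) =====
theorem is_html_only_line_spec : Claim_equal_is_html_only_line := by
  intro text _
  unfold Spec_is_html_only_line is_html_only_line is_html_only_line_alt
  exact aLoop_eq_bLoop text.toList 0 false
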